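-- pv_equiv track=rewrite | github.com/NilAtabey/ACSAI-Projects | 1.1-Python/MessyCardDeck-HW4/program01.py | wordlist_to_count
-- ===== SOURCE A (Python) =====
-- def wordlist_to_count(w_list):
--     final = []
--     counts = [{} for x in range(max(len(w) for w in w_list))]
--     for word in w_list:
--         for i, c in enumerate(word):
--                 counts[i][c] = counts[i].get(c, 0) + 1
--
--     for count in counts:
--         max_value = max(count.items(), key=lambda x: x[1])[1]
--         key_list = [k for k, v in count.items() if v == max_value]
--         final.append(min(key_list))
--     return ''.join(final)
-- ===== SOURCE B (Python) =====
-- def wordlist_to_count(w_list):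
--     n = max(len(w) for w in w_list)
--     out = []
--     for i in range(n):
--         col = sorted(w[i] for w in w_list if len(w) > i)
--         best = col[0]
--         best_run = 1
--         run = 1
--         for j in range(1, len(col)):
--             if col[j] == col[j - 1]:
--                 run += 1
--             else:
--                 run = 1
--             if run > best_run:
--                 best_run = run
--                 best = col[j]
--         out.append(best)
--     return ''.join(out)
-- ===== Notes on version B (the rewrite author's own statement) =====
-- stated objective: alternative
-- what changed: B transposes the words into per-position columns, sorts each column, and takes the mode by a run-length scan over the sorted column (a strictly greater run wins, so the smallest char breaks ties), replacing A's word-major build of per-position dicts with max/min over dict items.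
import Mathlib
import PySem

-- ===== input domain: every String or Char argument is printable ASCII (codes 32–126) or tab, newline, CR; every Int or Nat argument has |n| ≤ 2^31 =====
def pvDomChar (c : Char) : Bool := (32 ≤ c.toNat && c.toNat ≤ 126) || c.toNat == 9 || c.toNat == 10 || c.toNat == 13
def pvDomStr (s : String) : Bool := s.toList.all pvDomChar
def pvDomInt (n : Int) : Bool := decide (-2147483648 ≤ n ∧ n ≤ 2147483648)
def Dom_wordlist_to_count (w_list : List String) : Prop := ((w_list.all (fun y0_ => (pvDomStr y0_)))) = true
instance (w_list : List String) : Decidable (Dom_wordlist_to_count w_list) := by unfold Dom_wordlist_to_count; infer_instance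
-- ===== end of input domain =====

-- B replaces A's word-major dict counting by sort-then-run-length mode per column (alternative algorithm, same results).

-- shared helper: both Pythons compute max(len(w) for w in w_list); the 0 of the none branch is returned
-- only for w_list = [], where Python's max raises ValueError (excluded by Pre_)
def pvMaxLen (w_list : List String) : Nat :=
  match PySem.List.max? (w_list.map (fun w => w.toList.length)) (fun x => x) with
  | some m => m
  | none => 0

-- ===== PORT A =====
-- counts[i][c] = counts[i].get(c, 0) + 1
def pvDictBump (d : PySem.Dict Char Int) (c : Char) : PySem.Dict Char Int :=
  d.insert c (d.getD c 0 + 1)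

-- for i, c in enumerate(word): counts[i][c] = counts[i].get(c, 0) + 1
-- (the getD/set index i is always < counts.length: every word's length is ≤ the max length)
def pvStepWord (cs : List (PySem.Dict Char Int)) (w : String) : List (PySem.Dict Char Int) :=
  (PySem.List.enumerate w.toList).foldl
    (fun cs ic => cs.set ic.1.toNat (pvDictBump (cs.getD ic.1.toNat PySem.Dict.empty) ic.2)) cs

-- max_value = max(count.items(), key=lambda x: x[1])[1]; key_list = [k for k, v in … if v == max_value]; min(key_list)
-- (the none branches are unreachable: every dict in counts is nonempty when w_list ≠ [])
def pvPickA (d : PySem.Dict Char Int) : Char :=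
  let max_value : Int := match PySem.List.max? d.items (fun x => x.2) with
    | some p => p.2
    | none => 0
  let key_list := (d.items.filter (fun kv => kv.2 == max_value)).map (fun kv => kv.1)
  match PySem.List.min? key_list (fun k => k) with
  | some m => m
  | none => ' '

def wordlist_to_count (w_list : List String) : String :=
  let counts := w_list.foldl pvStepWord (List.replicate (pvMaxLen w_list) PySem.Dict.empty)
  String.ofList (counts.foldl (fun final d => final ++ [pvPickA d]) [])

-- ===== PORT B =====
-- col = [w[i] for w in w_list if len(w) > i]
def pvColumn (w_list : List String) (i : Nat) : List Char :=
  w_list.filterMap (fun w => w.toList[i]?)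

-- the run-length scan over the tail of the sorted column: state (prev char, current run, best char, best run)
def pvScan : List Char → Char → Nat → Char → Nat → Char
  | [], _, _, best, _ => best
  | c :: t, prev, run, best, bestRun =>
    let run' := if c = prev then run + 1 else 1
    if bestRun < run' then pvScan t c run' c run'
    else pvScan t c run' best bestRun

-- best = col[0], then the run-length scan ([] is unreachable: every column is nonempty when i < pvMaxLen)
def pvPickB (col : List Char) : Char :=
  match PySem.List.sorted col (fun c => c) false with
  | [] => ' '
  | c :: t => pvScan t c 1 c 1

def wordlist_to_count_alt (w_list : List String) : String :=
  String.ofList ((List.range (pvMaxLen w_list)).map (fun i => pvPickB (pvColumn w_list i)))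

-- ===== PRECONDITION & SPEC =====
-- Python A raises ValueError (max of an empty sequence) exactly on the empty list; so does B.
def Pre_wordlist_to_count (w_list : List String) : Prop := w_list ≠ []
instance (w_list : List String) : Decidable (Pre_wordlist_to_count w_list) := by
  unfold Pre_wordlist_to_count; infer_instance

def pvWitness_wordlist_to_count : List String := ["abc", "ab", "cbc"]

def Spec_wordlist_to_count (w_list : List String) (out : String) : Prop := out = wordlist_to_count_alt w_list
instance (w_list : List String) (out : String) : Decidable (Spec_wordlist_to_count w_list out) := by unfold Spec_wordlist_to_count; infer_instance

-- ===== CLAIM (what is proved, stated in full; the proofs are below) =====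
def Claim_equal_wordlist_to_count : Prop := ∀ (w_list : List String), Dom_wordlist_to_count w_list → Pre_wordlist_to_count w_list → Spec_wordlist_to_count w_list (wordlist_to_count w_list)

-- ===== LEMMAS AND PROOFS =====

-- the specification both pickers satisfy: m is the smallest most-frequent element of l
def pvIsMode (l : List Char) (m : Char) : Prop :=
  m ∈ l ∧ (∀ c : Char, l.count c ≤ l.count m) ∧ (∀ c ∈ l, l.count c = l.count m → m ≤ c)

lemma pvIsMode_unique {l : List Char} {m₁ m₂ : Char}
    (h1 : pvIsMode l m₁) (h2 : pvIsMode l m₂) : m₁ = m₂ := by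
  have hc : l.count m₁ = l.count m₂ := le_antisymm (h2.2.1 m₁) (h1.2.1 m₂)
  exact le_antisymm (h1.2.2 m₂ h2.1 (hc ▸ rfl)) (h2.2.2 m₁ h1.1 hc)

lemma pvIsMode_perm {l₁ l₂ : List Char} {m : Char} (hp : l₁.Perm l₂)
    (h : pvIsMode l₁ m) : pvIsMode l₂ m := by
  refine ⟨hp.mem_iff.mp h.1, fun c => ?_, fun c hc hcnt => ?_⟩
  · rw [← hp.count_eq, ← hp.count_eq]; exact h.2.1 c
  · exact h.2.2 c (hp.mem_iff.mpr hc) (by rw [hp.count_eq, hp.count_eq]; exact hcnt)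

-- A's per-dict pick, applied to the counter of a nonempty list, is the mode
lemma pvPickA_counter (l : List Char) (hl : l ≠ []) :
    pvIsMode l (pvPickA (PySem.Dict.counter l)) := by
  have hitems : (PySem.Dict.counter l).items
      = (PySem.Set.ofList l).map (fun k => (k, (l.count k : Int))) :=
    PySem.Dict.items_counter l
  have hmem : ∀ c : Char, c ∈ l → (c, (l.count c : Int)) ∈ (PySem.Dict.counter l).items := by
    intro c hc
    rw [hitems]
    exact List.mem_map.mpr ⟨c, (PySem.Set.mem_ofList l c).mpr hc, rfl⟩
  have hne : (PySem.Dict.counter l).items ≠ [] := by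
    obtain ⟨x, hx⟩ := List.exists_mem_of_ne_nil l hl
    exact List.ne_nil_of_mem (hmem x hx)
  obtain ⟨p, hp⟩ : ∃ p, PySem.List.max? (PySem.Dict.counter l).items (fun x => x.2) = some p := by
    cases h : PySem.List.max? (PySem.Dict.counter l).items (fun x => x.2) with
    | none => exact absurd ((PySem.List.max?_eq_none_iff _ _).mp h) hne
    | some p => exact ⟨p, rfl⟩
  have hpmem := PySem.List.max?_mem hp
  have hpmax := PySem.List.max?_isMax hp
  set key_list := ((PySem.Dict.counter l).items.filter (fun kv => kv.2 == p.2)).map (fun kv => kv.1) with hkl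
  have hklne : key_list ≠ [] := by
    apply List.ne_nil_of_mem (a := p.1)
    rw [hkl]
    exact List.mem_map.mpr ⟨p, List.mem_filter.mpr ⟨hpmem, by simp⟩, rfl⟩
  obtain ⟨m, hm⟩ : ∃ m, PySem.List.min? key_list (fun k => k) = some m := by
    cases h : PySem.List.min? key_list (fun k => k) with
    | none => exact absurd ((PySem.List.min?_eq_none_iff _ _).mp h) hklne
    | some m => exact ⟨m, rfl⟩
  have hmmem := PySem.List.min?_mem hm
  have hmmin := PySem.List.min?_isMin hm
  have hklmem : ∀ c : Char, c ∈ key_list ↔ c ∈ l ∧ (l.count c : Int) = p.2 := by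
    intro c
    rw [hkl]
    constructor
    · intro hc
      obtain ⟨kv, hkv, hkveq⟩ := List.mem_map.mp hc
      obtain ⟨hkv1, hkv2⟩ := List.mem_filter.mp hkv
      rw [hitems] at hkv1
      obtain ⟨k, hk, hkeq⟩ := List.mem_map.mp hkv1
      subst hkveq; rw [← hkeq] at hkv2 ⊢
      exact ⟨(PySem.Set.mem_ofList l k).mp hk, by simpa using hkv2⟩
    · rintro ⟨hcl, hcc⟩
      exact List.mem_map.mpr ⟨(c, (l.count c : Int)), List.mem_filter.mpr ⟨hmem c hcl, by simpa using hcc⟩, rfl⟩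
  have hresult : pvPickA (PySem.Dict.counter l) = m := by
    unfold pvPickA
    rw [hp]
    simp only []
    rw [← hkl, hm]
  rw [hresult]
  obtain ⟨hml, hmc⟩ := (hklmem m).mp hmmem
  refine ⟨hml, fun c => ?_, fun c hc hcnt => ?_⟩
  · by_cases hcl : c ∈ l
    · have h2 := hpmax _ (hmem c hcl)
      simp only at h2
      rw [← hmc] at h2
      exact_mod_cast h2
    · simp [List.count_eq_zero.mpr hcl]
  · exact hmmin c ((hklmem c).mpr ⟨hc, by rw [hcnt, hmc]⟩)

-- the run-length scan invariant: P already scanned (prev = its largest char, run/bestRun its counts,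
-- best its mode), R still to scan; the whole list sorted
lemma pvScan_spec : ∀ (R P : List Char) (prev best : Char) (run bestRun : Nat),
    (P ++ R).Pairwise (· ≤ ·) → prev ∈ P → (∀ x ∈ P, x ≤ prev) →
    run = P.count prev → bestRun = P.count best → pvIsMode P best →
    pvIsMode (P ++ R) (pvScan R prev run best bestRun) := by
  intro R
  induction R with
  | nil =>
    intro P prev best run bestRun _ _ _ _ _ hmode
    simpa [pvScan] using hmode
  | cons c R' ih =>
    intro P prev best run bestRun hpw hprevmem hprevmax hrun hbestRun hmode
    have hPc : ∀ x ∈ P, x ≤ c := fun x hx =>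
      (List.pairwise_append.mp hpw).2.2 x hx c (List.mem_cons_self ..)
    set P' := P ++ [c] with hP'
    have happ : P ++ c :: R' = P' ++ R' := by simp [hP']
    have hpw' : (P' ++ R').Pairwise (· ≤ ·) := by rw [← happ]; exact hpw
    have hcP' : c ∈ P' := by simp [hP']
    have hmaxP' : ∀ x ∈ P', x ≤ c := by
      intro x hx
      rcases List.mem_append.mp hx with h | h
      · exact hPc x h
      · simp at h; simp [h]
    have hcnotP : c ≠ prev → c ∉ P := by
      intro hcp hcin
      exact hcp (le_antisymm (hprevmax c hcin) (hPc prev hprevmem))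
    obtain ⟨rv, hrv⟩ : ∃ rv : Nat, rv = (if c = prev then run + 1 else 1) := ⟨_, rfl⟩
    have hrun' : rv = P'.count c := by
      by_cases hcp : c = prev
      · subst hcp; simp [hrv, hP', List.count_append, hrun]
      · simp [hrv, hcp, hP', List.count_append, List.count_eq_zero.mpr (hcnotP hcp)]
    have hcount' : ∀ d : Char, d ≠ c → P'.count d = P.count d := by
      intro d hd
      have hcd : c ≠ d := fun h => hd h.symm
      simp [hP', List.count_append, hcd]
    show pvIsMode (P ++ c :: R') (pvScan (c :: R') prev run best bestRun)
    rw [happ]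
    simp only [pvScan, ← hrv]
    by_cases hbr : bestRun < rv
    · rw [if_pos hbr]
      apply ih P' c c rv rv hpw' hcP' hmaxP' hrun' hrun'
      refine ⟨hcP', fun d => ?_, fun d hd hdc => ?_⟩
      · by_cases hdc : d = c
        · simp [hdc]
        · have h1 : P.count d ≤ bestRun := hbestRun ▸ hmode.2.1 d
          rw [hcount' d hdc, ← hrun']
          omega
      · by_cases hdceq : d = c
        · simp [hdceq]
        · exfalso
          rw [hcount' d hdceq, ← hrun'] at hdc
          have : P.count d ≤ bestRun := hbestRun ▸ hmode.2.1 d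
          omega
    · rw [if_neg hbr]
      have hbc : best ≠ c := by
        intro hbceq
        by_cases hcp : c = prev
        · rw [hbceq, hcp] at hbestRun
          rw [hrv, if_pos hcp] at hbr
          omega
        · exact (hcnotP hcp) (hbceq ▸ hmode.1)
      have hbestRun' : bestRun = P'.count best := by rw [hcount' best hbc]; exact hbestRun
      apply ih P' c best rv bestRun hpw' hcP' hmaxP' hrun' hbestRun'
      refine ⟨List.mem_append.mpr (Or.inl hmode.1), fun d => ?_, fun d hd hdc => ?_⟩
      · by_cases hdceq : d = c
        · rw [hdceq, ← hrun', ← hbestRun']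
          omega
        · rw [hcount' d hdceq, ← hbestRun', hbestRun]
          exact hmode.2.1 d
      · by_cases hdceq : d = c
        · exact hdceq ▸ hPc best hmode.1
        · rcases List.mem_append.mp hd with h | h
          · apply hmode.2.2 d h
            rw [hcount' d hdceq, hcount' best hbc] at hdc
            exact hdc
          · simp at h; exact absurd h hdceq

-- B's pick on a nonempty column is the mode
lemma pvPickB_mode (col : List Char) (h : col ≠ []) : pvIsMode col (pvPickB col) := by
  have hperm := PySem.List.sorted_perm col (fun c => c) false
  have hsne : PySem.List.sorted col (fun c => c) false ≠ [] := by
    rw [ne_eq, PySem.List.sorted_eq_nil_iff]; exact h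
  obtain ⟨c, t, hct⟩ := List.exists_cons_of_ne_nil hsne
  have hpw : (([c] : List Char) ++ t).Pairwise (· ≤ ·) := by
    have := PySem.List.sorted_pairwise col (fun c => c)
    rw [hct] at this
    simpa using this
  have hmode1 : pvIsMode [c] c := by
    refine ⟨List.mem_singleton_self c, fun d => ?_, fun d hd _ => ?_⟩
    · by_cases hdc : d = c <;> simp [hdc, List.count_singleton] <;> split <;> omega
    · simp at hd; simp [hd]
  have hspec := pvScan_spec t [c] c c 1 1 hpw (List.mem_singleton_self c)
    (fun x hx => by simp at hx; simp [hx]) (by simp) (by simp) hmode1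
  have hres : pvPickB col = pvScan t c 1 c 1 := by
    unfold pvPickB; rw [hct]
  rw [hres]
  apply pvIsMode_perm (l₁ := [c] ++ t)
  · simpa [← hct] using hperm
  · exact hspec

-- the inner enumerate-loop of A preserves the length of counts
lemma pvFoldEnum_length (l : List Char) : ∀ (s : Int) (cs : List (PySem.Dict Char Int)),
    ((PySem.List.enumerate l s).foldl
      (fun cs ic => cs.set ic.1.toNat (pvDictBump (cs.getD ic.1.toNat PySem.Dict.empty) ic.2)) cs).length
    = cs.length := by
  induction l with
  | nil => intro s cs; simp [PySem.List.enumerate]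
  | cons c l' ih =>
    intro s cs
    rw [PySem.List.enumerate_cons]
    simp only [List.foldl_cons]
    rw [ih]
    exact List.length_set ..

-- the inner enumerate-loop of A, entrywise: position j gets bumped with w[j] iff s ≤ j < s + len(w)
lemma pvFoldEnum_getD (l : List Char) : ∀ (s : Nat) (cs : List (PySem.Dict Char Int)),
    s + l.length ≤ cs.length → ∀ (j : Nat),
    ((PySem.List.enumerate l (s : Int)).foldl
      (fun cs ic => cs.set ic.1.toNat (pvDictBump (cs.getD ic.1.toNat PySem.Dict.empty) ic.2)) cs).getD j PySem.Dict.empty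
    = if s ≤ j then (match l[j - s]? with
        | some c => pvDictBump (cs.getD j PySem.Dict.empty) c
        | none => cs.getD j PySem.Dict.empty)
      else cs.getD j PySem.Dict.empty := by
  induction l with
  | nil =>
    intro s cs _ j
    simp [PySem.List.enumerate]
  | cons c l' ih =>
    intro s cs hlen j
    rw [PySem.List.enumerate_cons]
    simp only [List.foldl_cons]
    have hs1 : (s : Int) + 1 = ((s + 1 : Nat) : Int) := by push_cast; ring
    have htoNat : ((s : Int)).toNat = s := Int.toNat_natCast s
    rw [hs1, htoNat]
    set cs' := cs.set s (pvDictBump (cs.getD s PySem.Dict.empty) c) with hcs'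
    have hlen' : s + 1 + l'.length ≤ cs'.length := by
      rw [hcs', List.length_set]; simp at hlen ⊢; omega
    rw [ih (s + 1) cs' hlen' j]
    have hslt : s < cs.length := by simp at hlen; omega
    have hget' : ∀ k : Nat, cs'.getD k PySem.Dict.empty
        = if k = s then pvDictBump (cs.getD s PySem.Dict.empty) c else cs.getD k PySem.Dict.empty := by
      intro k
      rw [hcs']
      by_cases hk : k = s
      · subst hk
        rw [List.getD_eq_getElem?_getD, List.getElem?_set, if_pos rfl, if_pos hslt]
        simp
      · rw [List.getD_eq_getElem?_getD, List.getElem?_set, if_neg (fun h => hk h.symm),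
          ← List.getD_eq_getElem?_getD, if_neg hk]
    by_cases hsj : s ≤ j
    · rw [if_pos hsj]
      by_cases hjs : j = s
      · subst hjs
        rw [if_neg (by omega), hget' j, if_pos rfl]
        simp
      · have hsj1 : s + 1 ≤ j := by omega
        rw [if_pos hsj1, hget' j, if_neg hjs]
        have : j - s = (j - (s+1)) + 1 := by omega
        rw [this]
        simp
    · rw [if_neg hsj, if_neg (by omega), hget' j, if_neg (by omega)]

lemma pvStepWord_length (acc : List (PySem.Dict Char Int)) (w : String) :
    (pvStepWord acc w).length = acc.length := pvFoldEnum_length w.toList 0 acc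

lemma pvFoldWords_length : ∀ (ws : List String) (acc : List (PySem.Dict Char Int)),
    (ws.foldl pvStepWord acc).length = acc.length := by
  intro ws
  induction ws with
  | nil => intro acc; rfl
  | cons w ws ih => intro acc; rw [List.foldl_cons, ih, pvStepWord_length]

lemma pvStepWord_getD (acc : List (PySem.Dict Char Int)) (w : String)
    (hlen : w.toList.length ≤ acc.length) (j : Nat) :
    (pvStepWord acc w).getD j PySem.Dict.empty
    = match w.toList[j]? with
      | some c => pvDictBump (acc.getD j PySem.Dict.empty) c
      | none => acc.getD j PySem.Dict.empty := by
  have h := pvFoldEnum_getD w.toList 0 acc (by omega) j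
  unfold pvStepWord
  simpa using h

-- the word-major build of counts equals the column-major count fold, entrywise
lemma pvFoldWords_getD : ∀ (ws : List String) (acc : List (PySem.Dict Char Int)),
    (∀ w ∈ ws, w.toList.length ≤ acc.length) → ∀ (j : Nat),
    (ws.foldl pvStepWord acc).getD j PySem.Dict.empty
    = (pvColumn ws j).foldl pvDictBump (acc.getD j PySem.Dict.empty) := by
  intro ws
  induction ws with
  | nil => intro acc _ j; simp [pvColumn]
  | cons w ws ih =>
    intro acc hlen j
    rw [List.foldl_cons]
    have hlen' : ∀ w' ∈ ws, w'.toList.length ≤ (pvStepWord acc w).length := by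
      intro w' hw'
      rw [pvStepWord_length]
      exact hlen w' (List.mem_cons_of_mem _ hw')
    rw [ih (pvStepWord acc w) hlen' j,
      pvStepWord_getD acc w (hlen w (List.mem_cons_self ..)) j]
    unfold pvColumn
    rw [List.filterMap_cons]
    cases w.toList[j]? with
    | none => rfl
    | some c => simp

-- pvMaxLen: an upper bound attained by some word
lemma pvMaxLen_spec (w_list : List String) (h : w_list ≠ []) :
    (∀ w ∈ w_list, w.toList.length ≤ pvMaxLen w_list)
    ∧ (∃ w ∈ w_list, w.toList.length = pvMaxLen w_list) := by
  have hne : w_list.map (fun w => w.toList.length) ≠ [] := by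
    simpa using h
  obtain ⟨m, hm⟩ : ∃ m, PySem.List.max? (w_list.map (fun w => w.toList.length)) (fun x => x) = some m := by
    cases hmm : PySem.List.max? (w_list.map (fun w => w.toList.length)) (fun x => x) with
    | none => exact absurd ((PySem.List.max?_eq_none_iff _ _).mp hmm) hne
    | some m => exact ⟨m, rfl⟩
  have heq : pvMaxLen w_list = m := by unfold pvMaxLen; rw [hm]
  have hmax := PySem.List.max?_isMax hm
  have hmem := PySem.List.max?_mem hm
  rw [heq]
  constructor
  · intro w hw
    exact hmax _ (List.mem_map.mpr ⟨w, hw, rfl⟩)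
  · obtain ⟨w, hw, hwl⟩ := List.mem_map.mp hmem
    exact ⟨w, hw, hwl⟩

lemma pvColumn_ne_nil (w_list : List String) (h : w_list ≠ []) (i : Nat)
    (hi : i < pvMaxLen w_list) : pvColumn w_list i ≠ [] := by
  obtain ⟨w, hw, hwl⟩ := (pvMaxLen_spec w_list h).2
  have hil : i < w.toList.length := by omega
  exact List.ne_nil_of_mem
    (List.mem_filterMap.mpr ⟨w, hw, by rw [List.getElem?_eq_getElem hil]⟩)

-- ===== VERDICT (by name: the statement is the Claim_ definition above) =====
theorem wordlist_to_count_spec : Claim_equal_wordlist_to_count := by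
  intro w_list _ hpre
  unfold Spec_wordlist_to_count wordlist_to_count wordlist_to_count_alt
  simp only [PySem.List.foldl_append_singleton_eq_map, List.nil_append]
  congr 1
  set n := pvMaxLen w_list with hn
  set counts := w_list.foldl pvStepWord (List.replicate n PySem.Dict.empty) with hcounts
  have hclen : counts.length = n := by
    rw [hcounts, pvFoldWords_length, List.length_replicate]
  apply List.ext_getElem
  · simp [hclen]
  · intro i h1 h2
    simp only [List.getElem_map, List.getElem_range]
    have hin : i < n := by simpa [hclen] using h1
    have hicounts : i < counts.length := by omega
    have hget : counts[i] = counts.getD i PySem.Dict.empty := by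
      rw [List.getD_eq_getElem?_getD, List.getElem?_eq_getElem hicounts]
      rfl
    have hcol : counts[i] = PySem.Dict.counter (pvColumn w_list i) := by
      rw [hget, hcounts, pvFoldWords_getD w_list _ ?_ i]
      · rw [List.getD_replicate _ hin, ← PySem.Dict.foldl_insert_getD_add_one_eq_counter]
        rfl
      · intro w hw
        rw [List.length_replicate]
        exact (pvMaxLen_spec w_list hpre).1 w hw
    have hcne := pvColumn_ne_nil w_list hpre i hin
    rw [hcol]
    exact pvIsMode_unique (pvPickA_counter _ hcne) (pvPickB_mode _ hcne)
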